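-- pv_equiv track=rewrite | github.com/HaibaneAzer/PHYS117-P8 | LHCO_to_table.py | event_counter
-- ===== SOURCE A (Python) =====
-- def event_counter(events, particles):
--     # Initialize counters for each particle/unit
--     counters = {particle_info['label']: 0 for particle_info in particles}
--
--     for n in range(len(events)):
--         empty_event = True
--
--         for particle_info in particles:
--             particle_name = particle_info['name']
--             particle_label = particle_info['label']
--
--             if events[n][particle_name]:
--                 counters[particle_label] += 1
--                 empty_event = False
--
--         # If all particles are missing, mark the event as empty
--         if empty_event:
--             counters['Empty Event'] += 1
--
--     return counters
-- ===== SOURCE B (Python) =====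
-- def event_counter(events, particles):
--     counters = {p['label']: 0 for p in particles}
--     # pass 1: per particle, count the events where that particle is present
--     for p in particles:
--         counters[p['label']] += sum(1 for e in events if e[p['name']])
--     # pass 2: count the events in which every particle is absent
--     n_empty = sum(1 for e in events if not any(e[p['name']] for p in particles))
--     if n_empty:
--         counters['Empty Event'] += n_empty
--     return counters
-- ===== Notes on version B (the rewrite author's own statement) =====
-- stated objective: alternative
-- what changed: A's single fused pass (per event: bump each present particle's counter, else bump 'Empty Event') is replaced by two separately shaped passes: a per-particle pass that adds that particle's whole event count at once, and a per-event pass counting the all-absent events, added in one final update.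
import Mathlib
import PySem

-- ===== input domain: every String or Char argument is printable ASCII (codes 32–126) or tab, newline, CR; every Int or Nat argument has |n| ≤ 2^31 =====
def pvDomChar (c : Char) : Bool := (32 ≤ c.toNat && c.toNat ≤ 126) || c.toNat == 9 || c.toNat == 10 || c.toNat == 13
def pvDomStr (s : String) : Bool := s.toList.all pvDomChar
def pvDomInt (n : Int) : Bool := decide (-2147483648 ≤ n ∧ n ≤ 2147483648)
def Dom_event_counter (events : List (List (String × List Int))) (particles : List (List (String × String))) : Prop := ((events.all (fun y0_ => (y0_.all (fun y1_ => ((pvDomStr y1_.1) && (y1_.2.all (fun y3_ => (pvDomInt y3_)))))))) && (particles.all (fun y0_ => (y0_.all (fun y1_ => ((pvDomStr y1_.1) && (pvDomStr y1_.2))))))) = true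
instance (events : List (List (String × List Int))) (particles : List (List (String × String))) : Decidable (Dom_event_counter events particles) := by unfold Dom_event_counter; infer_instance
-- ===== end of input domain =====

-- B replaces A's single fused pass (per event: bump each present particle, else bump 'Empty Event')
-- by two separately shaped passes: one per-particle pass adding that particle's event count in one go,
-- and one per-event pass counting the all-absent events; objective: alternative decomposition, same cost.

-- shared lookup helpers (Python dict access on the association-list arguments)
def pvLab (p : List (String × String)) : String := (PySem.Dict.mk p).getD "label" ""
def pvName (p : List (String × String)) : String := (PySem.Dict.mk p).getD "name" ""
def pvVal (e : List (String × List Int)) (k : String) : List Int := (PySem.Dict.mk e).getD k []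
-- the initial dict comprehension {p['label']: 0 for p in particles}, identical in A and B
def pvInit (particles : List (List (String × String))) : PySem.Dict String Int :=
  particles.foldl (fun d p => d.insert (pvLab p) 0) PySem.Dict.empty

-- ===== PORT A =====
-- A's inner 'for particle_info in particles' loop (state: counters so far, empty_event flag)
def pvInnerA (particles : List (List (String × String))) (ev : List (String × List Int))
    (st : PySem.Dict String Int × Bool) : PySem.Dict String Int × Bool :=
  particles.foldl
    (fun (st : PySem.Dict String Int × Bool) p =>
      if pvVal ev (pvName p) ≠ [] then (st.1.modify (pvLab p) 0 (· + 1), false) else st)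
    st
-- the body of A's 'for n in range(len(events))' loop
def pvStepA (particles : List (List (String × String)))
    (c : PySem.Dict String Int) (ev : List (String × List Int)) : PySem.Dict String Int :=
  let st := pvInnerA particles ev (c, true)
  if st.2 then st.1.modify "Empty Event" 0 (· + 1) else st.1

def event_counter (events : List (List (String × List Int))) (particles : List (List (String × String))) : List (String × Int) :=
  ((PySem.List.pyRange 0 (events.length : Int) 1).foldl
      (fun c n => pvStepA particles c (PySem.List.pyGetD events n [])) (pvInit particles)).items

-- ===== PORT B =====
def event_counter_alt (events : List (List (String × List Int))) (particles : List (List (String × String))) : List (String × Int) :=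
  -- pass 1: per particle, add the number of events where that particle is present
  let c1 := particles.foldl
    (fun d p => d.modify (pvLab p) 0
      (· + ((events.countP (fun e => !(pvVal e (pvName p)).isEmpty) : Nat) : Int)))
    (pvInit particles)
  -- pass 2: count the events in which every particle is absent
  let nEmpty : Int := (events.countP (fun e => !(particles.any (fun p => !(pvVal e (pvName p)).isEmpty))) : Nat)
  if nEmpty ≠ 0 then (c1.modify "Empty Event" 0 (· + nEmpty)).items else c1.items

-- ===== PRECONDITION & SPEC =====
-- Pre_ is exactly the no-KeyError condition of A: every particle dict has a 'label' key (and, once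
-- there is an event to scan, a 'name' key), every event dict has every particle's name as a key, and
-- if some event is empty then 'Empty Event' is one of the labels.
def Pre_event_counter (events : List (List (String × List Int))) (particles : List (List (String × String))) : Prop :=
  (∀ p ∈ particles, (PySem.Dict.mk p).contains "label" = true) ∧
  (events ≠ [] → ∀ p ∈ particles, (PySem.Dict.mk p).contains "name" = true) ∧
  (∀ e ∈ events, ∀ p ∈ particles, (PySem.Dict.mk e).contains (pvName p) = true) ∧
  ((∃ e ∈ events, ∀ p ∈ particles, pvVal e (pvName p) = []) → "Empty Event" ∈ particles.map pvLab)
instance (events : List (List (String × List Int))) (particles : List (List (String × String))) : Decidable (Pre_event_counter events particles) := by unfold Pre_event_counter; infer_instance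

def pvWitness_event_counter : (List (List (String × List Int))) × (List (List (String × String))) :=
  ([[("jet", [1]), ("mu", [])], [("jet", []), ("mu", [])]],
   [[("label", "jet"), ("name", "jet")], [("label", "Empty Event"), ("name", "mu")]])

def Spec_event_counter (events : List (List (String × List Int))) (particles : List (List (String × String))) (out : List (String × Int)) : Prop := out = event_counter_alt events particles
instance (events : List (List (String × List Int))) (particles : List (List (String × String))) (out : List (String × Int)) : Decidable (Spec_event_counter events particles out) := by unfold Spec_event_counter; infer_instance

-- ===== CLAIM (what is proved, stated in full; the proofs are below) =====
def Claim_equal_event_counter : Prop := ∀ (events : List (List (String × List Int))) (particles : List (List (String × String))), Dom_event_counter events particles → Pre_event_counter events particles → Spec_event_counter events particles (event_counter events particles)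

-- ===== LEMMAS AND PROOFS =====

-- proof-side vocabulary
def pvTruthy (e : List (String × List Int)) (p : List (String × String)) : Bool :=
  !(pvVal e (pvName p)).isEmpty
def pvEmptyEv (particles : List (List (String × String))) (e : List (String × List Int)) : Bool :=
  !(particles.any (fun p => pvTruthy e p))
-- how much one event adds to key k inside A's inner particle loop
def pvAddA (particles : List (List (String × String))) (e : List (String × List Int)) (k : String) : Int :=
  (particles.countP (fun p => pvLab p == k && pvTruthy e p) : Nat)
-- total contribution of one event to key k in A (particle bumps + the empty-event bump)
def pvEvAdd (particles : List (List (String × String))) (e : List (String × List Int)) (k : String) : Int :=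
  pvAddA particles e k + (if pvEmptyEv particles e ∧ k = "Empty Event" then 1 else 0)

-- ---- inner particle fold of A ----
theorem innerA_snd (e : List (String × List Int)) (particles : List (List (String × String)))
    (d : PySem.Dict String Int) (b : Bool) :
    (pvInnerA particles e (d, b)).2 = (b && pvEmptyEv particles e) := by
  unfold pvInnerA
  induction particles generalizing d b with
  | nil => simp [pvEmptyEv]
  | cons p ps ih =>
    simp only [List.foldl_cons]
    by_cases h : pvVal e (pvName p) ≠ []
    · rw [if_pos h, ih]
      have ht : pvTruthy e p = true := by
        simpa [pvTruthy, List.isEmpty_iff] using h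
      simp [pvEmptyEv, ht]
    · rw [if_neg h, ih]
      have ht : pvTruthy e p = false := by
        simp only [ne_eq, not_not] at h
        simp [pvTruthy, h]
      simp [pvEmptyEv, ht]

theorem innerA_getD (e : List (String × List Int)) (particles : List (List (String × String)))
    (d : PySem.Dict String Int) (b : Bool) (k : String) :
    ((pvInnerA particles e (d, b)).1).getD k 0 = d.getD k 0 + pvAddA particles e k := by
  unfold pvInnerA
  induction particles generalizing d b with
  | nil => simp [pvAddA]
  | cons p ps ih =>
    simp only [List.foldl_cons]
    by_cases h : pvVal e (pvName p) ≠ []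
    · have ht : pvTruthy e p = true := by
        simpa [pvTruthy, List.isEmpty_iff] using h
      rw [if_pos h, ih, PySem.Dict.getD_modify]
      simp only [pvAddA, List.countP_cons, ht, Bool.and_true]
      by_cases hk : pvLab p = k
      · simp [hk]; ring
      · have hk2 : ¬ (k = pvLab p) := fun hh => hk hh.symm
        simp [hk, hk2]
    · have ht : pvTruthy e p = false := by
        simp only [ne_eq, not_not] at h
        simp [pvTruthy, h]
      rw [if_neg h, ih]
      simp [pvAddA, ht]

theorem innerA_keys (e : List (String × List Int)) (particles : List (List (String × String)))
    (d : PySem.Dict String Int) (b : Bool)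
    (hlab : ∀ p ∈ particles, pvLab p ∈ d.keys) :
    ((pvInnerA particles e (d, b)).1).keys = d.keys := by
  unfold pvInnerA
  induction particles generalizing d b with
  | nil => simp
  | cons p ps ih =>
    simp only [List.foldl_cons]
    have hkm : (d.modify (pvLab p) 0 (· + 1)).keys = d.keys := by
      rw [PySem.Dict.keys_modify, PySem.Dict.keys_insert_of_contains]
      exact (PySem.Dict.contains_iff_mem_keys d (pvLab p)).2 (hlab p (List.mem_cons_self))
    by_cases h : pvVal e (pvName p) ≠ []
    · rw [if_pos h, ih _ _ (fun q hq => hkm ▸ hlab q (List.mem_cons_of_mem _ hq)), hkm]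
    · rw [if_neg h]
      exact ih _ _ (fun q hq => hlab q (List.mem_cons_of_mem _ hq))

-- ---- A's event fold ----
theorem stepA_getD (particles : List (List (String × String))) (e : List (String × List Int))
    (d : PySem.Dict String Int) (k : String) :
    (pvStepA particles d e).getD k 0 = d.getD k 0 + pvEvAdd particles e k := by
  simp only [pvStepA, innerA_snd, Bool.true_and]
  by_cases hemp : pvEmptyEv particles e = true
  · rw [if_pos hemp, PySem.Dict.getD_modify]
    simp only [innerA_getD]
    unfold pvEvAdd
    by_cases hk : k = "Empty Event"
    · subst hk
      rw [if_pos rfl, if_pos ⟨hemp, rfl⟩]; ring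
    · rw [if_neg hk, if_neg (fun hc => hk hc.2)]; ring
  · rw [if_neg hemp, innerA_getD]
    unfold pvEvAdd
    rw [if_neg (fun hc => hemp hc.1)]
    ring

theorem stepA_keys (particles : List (List (String × String))) (e : List (String × List Int))
    (d : PySem.Dict String Int)
    (hlab : ∀ p ∈ particles, pvLab p ∈ d.keys)
    (hEE : pvEmptyEv particles e = true → "Empty Event" ∈ d.keys) :
    (pvStepA particles d e).keys = d.keys := by
  simp only [pvStepA, innerA_snd, Bool.true_and]
  by_cases hemp : pvEmptyEv particles e = true
  · rw [if_pos hemp, PySem.Dict.keys_modify, PySem.Dict.keys_insert_of_contains, innerA_keys e particles d _ hlab]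
    rw [PySem.Dict.contains_iff_mem_keys, innerA_keys e particles d _ hlab]
    exact hEE hemp
  · rw [if_neg hemp]
    exact innerA_keys e particles d _ hlab

theorem foldA_getD (particles : List (List (String × String))) (events : List (List (String × List Int)))
    (d : PySem.Dict String Int) (k : String) :
    (events.foldl (pvStepA particles) d).getD k 0
      = d.getD k 0 + (events.map (fun e => pvEvAdd particles e k)).sum := by
  induction events generalizing d with
  | nil => simp
  | cons e es ih =>
    simp only [List.foldl_cons, List.map_cons, List.sum_cons, ih, stepA_getD]
    ring

theorem foldA_keys (particles : List (List (String × String))) (events : List (List (String × List Int)))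
    (d : PySem.Dict String Int)
    (hlab : ∀ p ∈ particles, pvLab p ∈ d.keys)
    (hEE : (∃ e ∈ events, pvEmptyEv particles e = true) → "Empty Event" ∈ d.keys) :
    (events.foldl (pvStepA particles) d).keys = d.keys := by
  induction events generalizing d with
  | nil => simp
  | cons e es ih =>
    simp only [List.foldl_cons]
    have hk1 : (pvStepA particles d e).keys = d.keys :=
      stepA_keys particles e d hlab (fun h => hEE ⟨e, List.mem_cons_self, h⟩)
    rw [ih _ (fun q hq => hk1 ▸ hlab q hq)
          (fun ⟨e', he', h'⟩ => hk1 ▸ hEE ⟨e', List.mem_cons_of_mem _ he', h'⟩), hk1]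

-- ---- B's particle pass ----
theorem foldB_getD (events : List (List (String × List Int))) (particles : List (List (String × String)))
    (d : PySem.Dict String Int) (k : String) :
    (particles.foldl
      (fun d p => d.modify (pvLab p) 0
        (· + ((events.countP (fun e => !(pvVal e (pvName p)).isEmpty) : Nat) : Int))) d).getD k 0
      = d.getD k 0
        + (particles.map (fun p =>
            if pvLab p = k then ((events.countP (fun e => pvTruthy e p) : Nat) : Int) else 0)).sum := by
  induction particles generalizing d with
  | nil => simp
  | cons p ps ih =>
    simp only [List.foldl_cons, List.map_cons, List.sum_cons, ih, PySem.Dict.getD_modify]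
    by_cases hk : k = pvLab p
    · simp [hk, pvTruthy]; ring
    · have hk2 : ¬ (pvLab p = k) := fun hh => hk hh.symm
      simp [hk, hk2, pvTruthy]

theorem foldB_keys (events : List (List (String × List Int))) (particles : List (List (String × String)))
    (d : PySem.Dict String Int)
    (hlab : ∀ p ∈ particles, pvLab p ∈ d.keys) :
    (particles.foldl
      (fun d p => d.modify (pvLab p) 0
        (· + ((events.countP (fun e => !(pvVal e (pvName p)).isEmpty) : Nat) : Int))) d).keys = d.keys := by
  induction particles generalizing d with
  | nil => simp
  | cons p ps ih =>
    simp only [List.foldl_cons]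
    have hkm : (d.modify (pvLab p) 0
        (· + ((events.countP (fun e => !(pvVal e (pvName p)).isEmpty) : Nat) : Int))).keys = d.keys := by
      rw [PySem.Dict.keys_modify, PySem.Dict.keys_insert_of_contains]
      exact (PySem.Dict.contains_iff_mem_keys d (pvLab p)).2 (hlab p (List.mem_cons_self))
    rw [ih _ (fun q hq => hkm ▸ hlab q (List.mem_cons_of_mem _ hq)), hkm]

-- ---- the double-counting swap: per-event particle bumps = per-particle event counts ----
theorem sum_addA_swap (events : List (List (String × List Int))) (particles : List (List (String × String))) (k : String) :
    (events.map (fun e => pvAddA particles e k)).sum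
      = (particles.map (fun p =>
          if pvLab p = k then ((events.countP (fun e => pvTruthy e p) : Nat) : Int) else 0)).sum := by
  induction particles with
  | nil => simp [pvAddA]
  | cons p ps ih =>
    simp only [List.map_cons, List.sum_cons]
    have hsplit : ∀ e, pvAddA (p :: ps) e k
        = (if pvLab p == k && pvTruthy e p then 1 else 0) + pvAddA ps e k := by
      intro e; simp [pvAddA, List.countP_cons]; ring
    calc (events.map (fun e => pvAddA (p :: ps) e k)).sum
        = (events.map (fun e => (if pvLab p == k && pvTruthy e p then (1:Int) else 0) + pvAddA ps e k)).sum := by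
          simp only [hsplit]
      _ = (events.map (fun e => if pvLab p == k && pvTruthy e p then (1:Int) else 0)).sum
            + (events.map (fun e => pvAddA ps e k)).sum := PySem.List.sum_map_add_int _ _ _
      _ = (if pvLab p = k then ((events.countP (fun e => pvTruthy e p) : Nat) : Int) else 0)
            + (ps.map (fun p =>
                if pvLab p = k then ((events.countP (fun e => pvTruthy e p) : Nat) : Int) else 0)).sum := by
          rw [ih]
          congr 1
          by_cases hk : pvLab p = k
          · simp only [hk, beq_self_eq_true, Bool.true_and, if_true]
            exact PySem.List.sum_map_ite_one_zero _ _
          · simp [hk]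

theorem sum_empty_part (events : List (List (String × List Int))) (particles : List (List (String × String))) (k : String) :
    (events.map (fun e => if pvEmptyEv particles e ∧ k = "Empty Event" then (1:Int) else 0)).sum
      = if k = "Empty Event" then ((events.countP (pvEmptyEv particles) : Nat) : Int) else 0 := by
  by_cases hk : k = "Empty Event"
  · simp only [hk, and_true, if_true]
    exact PySem.List.sum_map_ite_one_zero _ _
  · simp [hk]

-- keys of the initial dict
theorem mem_keys_init (particles : List (List (String × String))) (k : String) :
    k ∈ (pvInit particles).keys ↔ k ∈ particles.map pvLab := by
  unfold pvInit
  rw [PySem.Dict.keys_foldl_insert_key particles pvLab (fun _ _ => 0) PySem.Dict.empty]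
  simp [PySem.Set.mem_update, PySem.Dict.keys_empty]

theorem nodup_keys_init (particles : List (List (String × String))) : (pvInit particles).keys.Nodup :=
  PySem.Dict.nodup_keys_foldl_insert_key particles pvLab (fun _ _ => 0) PySem.Dict.empty
    (by simp [PySem.Dict.keys_empty])

-- pvEmptyEv restated as Pre_'s emptiness condition
theorem emptyEv_iff (particles : List (List (String × String))) (e : List (String × List Int)) :
    pvEmptyEv particles e = true ↔ ∀ p ∈ particles, pvVal e (pvName p) = [] := by
  simp [pvEmptyEv, pvTruthy]

-- ===== VERDICT (by name: the statement is the Claim_ definition above) =====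
theorem event_counter_spec : Claim_equal_event_counter := by
  intro events particles _ hpre
  obtain ⟨hlabel, hname, hev, hEE⟩ := hpre
  unfold Spec_event_counter event_counter event_counter_alt
  rw [PySem.List.foldl_pyRange_zero_pyGetD' events [] (pvStepA particles) (pvInit particles)]
  have hlab0 : ∀ p ∈ particles, pvLab p ∈ (pvInit particles).keys := by
    intro p hp; exact (mem_keys_init particles _).2 (List.mem_map_of_mem hp)
  have hEE' : (∃ e ∈ events, pvEmptyEv particles e = true) → "Empty Event" ∈ (pvInit particles).keys := by
    rintro ⟨e, he, hemp⟩
    exact (mem_keys_init particles _).2 (hEE ⟨e, he, (emptyEv_iff particles e).1 hemp⟩)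
  -- both sides have the initial keys
  have hAkeys : (events.foldl (pvStepA particles) (pvInit particles)).keys = (pvInit particles).keys :=
    foldA_keys particles events _ hlab0 hEE'
  have hBkeys : (particles.foldl
      (fun d p => d.modify (pvLab p) 0
        (· + ((events.countP (fun e => !(pvVal e (pvName p)).isEmpty) : Nat) : Int)))
      (pvInit particles)).keys = (pvInit particles).keys :=
    foldB_keys events particles _ hlab0
  -- pointwise values agree
  have hval : ∀ k, (events.foldl (pvStepA particles) (pvInit particles)).getD k 0
      = (pvInit particles).getD k 0
        + (particles.map (fun p =>
            if pvLab p = k then ((events.countP (fun e => pvTruthy e p) : Nat) : Int) else 0)).sum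
        + (if k = "Empty Event" then ((events.countP (pvEmptyEv particles) : Nat) : Int) else 0) := by
    intro k
    rw [foldA_getD]
    have : (events.map (fun e => pvEvAdd particles e k)).sum
        = (events.map (fun e => pvAddA particles e k)).sum
          + (events.map (fun e => if pvEmptyEv particles e ∧ k = "Empty Event" then (1:Int) else 0)).sum := by
      rw [← PySem.List.sum_map_add_int]; rfl
    rw [this, sum_addA_swap, sum_empty_part]; ring
  set nEmpty : Int := ((events.countP (fun e => !(particles.any (fun p => !(pvVal e (pvName p)).isEmpty))) : Nat) : Int) with hnE
  have hnEmpty : nEmpty = ((events.countP (pvEmptyEv particles) : Nat) : Int) := by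
    rw [hnE]; rfl
  have hAnodup : (events.foldl (pvStepA particles) (pvInit particles)).keys.Nodup := by
    rw [hAkeys]; exact nodup_keys_init particles
  by_cases hz : nEmpty ≠ 0
  · rw [if_pos hz]
    have hex : ∃ e ∈ events, pvEmptyEv particles e = true := by
      by_contra hno
      push Not at hno
      apply hz
      rw [hnEmpty]
      have h0 : events.countP (pvEmptyEv particles) = 0 :=
        List.countP_eq_zero.2 (by intro a ha; simp [hno a ha])
      simp [h0]
    have hEEkeys : "Empty Event" ∈ (pvInit particles).keys := hEE' hex
    have hcont : (particles.foldl
        (fun d p => d.modify (pvLab p) 0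
          (· + ((events.countP (fun e => !(pvVal e (pvName p)).isEmpty) : Nat) : Int)))
        (pvInit particles)).contains "Empty Event" = true := by
      rw [PySem.Dict.contains_iff_mem_keys, hBkeys]; exact hEEkeys
    have hBkeys2 : ((particles.foldl
        (fun d p => d.modify (pvLab p) 0
          (· + ((events.countP (fun e => !(pvVal e (pvName p)).isEmpty) : Nat) : Int)))
        (pvInit particles)).modify "Empty Event" 0 (· + nEmpty)).keys = (pvInit particles).keys := by
      rw [PySem.Dict.keys_modify, PySem.Dict.keys_insert_of_contains _ _ hcont, hBkeys]
    have hBnodup : ((particles.foldl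
        (fun d p => d.modify (pvLab p) 0
          (· + ((events.countP (fun e => !(pvVal e (pvName p)).isEmpty) : Nat) : Int)))
        (pvInit particles)).modify "Empty Event" 0 (· + nEmpty)).keys.Nodup := by
      rw [hBkeys2]; exact nodup_keys_init particles
    rw [PySem.Dict.items_eq_map_keys _ hAnodup 0, PySem.Dict.items_eq_map_keys _ hBnodup 0,
        hAkeys, hBkeys2]
    refine List.map_congr_left (fun k _ => ?_)
    have hvk : (events.foldl (pvStepA particles) (pvInit particles)).getD k 0
        = ((particles.foldl
            (fun d p => d.modify (pvLab p) 0
              (· + ((events.countP (fun e => !(pvVal e (pvName p)).isEmpty) : Nat) : Int)))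
            (pvInit particles)).modify "Empty Event" 0 (· + nEmpty)).getD k 0 := by
      rw [hval k, PySem.Dict.getD_modify]
      simp only [foldB_getD]
      by_cases hk : k = "Empty Event"
      · subst hk
        rw [if_pos rfl, if_pos rfl, hnEmpty]
      · rw [if_neg hk, if_neg hk]; ring
    simp [hvk]
  · rw [if_neg hz]
    have hBnodup : (particles.foldl
        (fun d p => d.modify (pvLab p) 0
          (· + ((events.countP (fun e => !(pvVal e (pvName p)).isEmpty) : Nat) : Int)))
        (pvInit particles)).keys.Nodup := by
      rw [hBkeys]; exact nodup_keys_init particles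
    rw [PySem.Dict.items_eq_map_keys _ hAnodup 0, PySem.Dict.items_eq_map_keys _ hBnodup 0,
        hAkeys, hBkeys]
    refine List.map_congr_left (fun k _ => ?_)
    have h0 : ((events.countP (pvEmptyEv particles) : Nat) : Int) = 0 := by
      rw [← hnEmpty]; exact not_ne_iff.1 hz
    have hvk : (events.foldl (pvStepA particles) (pvInit particles)).getD k 0
        = (particles.foldl
            (fun d p => d.modify (pvLab p) 0
              (· + ((events.countP (fun e => !(pvVal e (pvName p)).isEmpty) : Nat) : Int)))
            (pvInit particles)).getD k 0 := by
      rw [hval k, foldB_getD]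
      by_cases hk : k = "Empty Event"
      · rw [if_pos hk, h0]; ring
      · rw [if_neg hk]; ring
    simp [hvk]
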